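-- pv_equiv track=rewrite | github.com/rathee-ashish/m3u-updater | update_star.py | parse_m3u_blocks
-- ===== SOURCE A (Python) =====
-- def parse_m3u_blocks(lines):
--     header = []
--     blocks = []
--     current_block = []
--     current_name = None
--     in_block = False
--     for line in lines:
--         if line.startswith("#EXTINF"):
--             if in_block and current_block and current_name is not None:
--                 blocks.append((current_name, current_block))
--             current_block = [line]
--             current_name = line.rpartition(",")[2].strip()
--             in_block = True
--         else:
--             if in_block:
--                 current_block.append(line)
--             else:
--                 header.append(line)
--     if in_block and current_block and current_name is not None:
--         blocks.append((current_name, current_block))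
--     return header, blocks
-- ===== SOURCE B (Python) =====
-- def _name(line):
--     return line.rpartition(",")[2].strip()
--
--
-- def _blocks(lines, idxs):
--     bounds = idxs + [len(lines)]
--     return [(_name(lines[s]), lines[s:e]) for s, e in zip(bounds, bounds[1:])]
--
--
-- def parse_m3u_blocks(lines):
--     lines = list(lines)
--     idxs = [i for i, line in enumerate(lines) if line.startswith("#EXTINF")]
--     if not idxs:
--         return lines, []
--     return lines[:idxs[0]], _blocks(lines, idxs)
-- ===== Notes on version B (the rewrite author's own statement) =====
-- stated objective: alternative
-- what changed: B replaces A's single-pass state machine (in_block flag, current block/name accumulators, flush on next boundary) by a boundary-index decomposition: it first collects the indices of '#EXTINF' lines, takes the header as the prefix before the first index, and builds each block by slicing between consecutive boundary indices.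
import Mathlib
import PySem

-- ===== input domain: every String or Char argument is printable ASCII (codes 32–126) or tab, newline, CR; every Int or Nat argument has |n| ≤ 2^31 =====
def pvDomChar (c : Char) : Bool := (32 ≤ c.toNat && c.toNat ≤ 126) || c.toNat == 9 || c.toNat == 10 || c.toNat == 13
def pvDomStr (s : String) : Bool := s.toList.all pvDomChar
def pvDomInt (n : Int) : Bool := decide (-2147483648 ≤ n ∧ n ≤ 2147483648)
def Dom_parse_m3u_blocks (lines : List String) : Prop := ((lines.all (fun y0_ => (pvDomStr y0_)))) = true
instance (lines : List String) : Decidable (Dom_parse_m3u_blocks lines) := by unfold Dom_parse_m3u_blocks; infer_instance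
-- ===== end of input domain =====

-- B replaces A's one-pass in-block/flush state machine by a boundary-index-then-slice
-- decomposition (objective: alternative; same asymptotic cost).

-- line.rpartition(",")[2].strip(), shared by both Pythons: rfind gives the index of the
-- last ',' or -1; [2] is the substring after it (the whole line if there is no ',').
-- Exact hand port of rpartition-then-strip.
def pvName (line : String) : String :=
  let i := PySem.Str.rfind line ","
  if i = -1 then PySem.Str.strip line
  else PySem.Str.strip (PySem.Str.slice line (some (i + 1)) none)

-- ===== PORT A =====
-- fold state = (header, blocks, current_block, current_name, in_block);
-- `current_name.getD ""` is only read under `current_name.isSome`, exactly as Python's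
-- append of `current_name` only happens under `current_name is not None`.
def pvStepA (st : List String × List (String × List String) × List String × Option String × Bool)
    (line : String) : List String × List (String × List String) × List String × Option String × Bool :=
  let (header, blocks, current_block, current_name, in_block) := st
  if PySem.Str.startswith line "#EXTINF" then
    let blocks := if in_block && !current_block.isEmpty && current_name.isSome then
        blocks ++ [(current_name.getD "", current_block)] else blocks
    (header, blocks, [line], some (pvName line), true)
  else
    if in_block then (header, blocks, current_block ++ [line], current_name, in_block)
    else (header ++ [line], blocks, current_block, current_name, in_block)

-- the flush after the loop
def pvFinishA (st : List String × List (String × List String) × List String × Option String × Bool) :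
    List String × List (String × List String) :=
  let (header, blocks, current_block, current_name, in_block) := st
  if in_block && !current_block.isEmpty && current_name.isSome then
    (header, blocks ++ [(current_name.getD "", current_block)])
  else (header, blocks)

def parse_m3u_blocks (lines : List String) : List String × (List (String × List String)) :=
  pvFinishA (lines.foldl pvStepA ([], [], [], none, false))

-- ===== PORT B =====
-- idxs = [i for i, line in enumerate(lines) if line.startswith("#EXTINF")]
def pvIdxs (lines : List String) : List Int :=
  ((PySem.List.enumerate lines 0).filter (fun p => PySem.Str.startswith p.2 "#EXTINF")).map (fun p => p.1)

-- _blocks(lines, idxs): slice between consecutive bounds; lines[s] via pyGet?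
-- (s is always in range, so the getD default is never read).
def pvBlocksB (lines : List String) (idxs : List Int) : List (String × List String) :=
  ((idxs ++ [(lines.length : Int)]).zip (idxs ++ [(lines.length : Int)]).tail).map (fun se =>
    (pvName ((PySem.List.pyGet? lines se.1).getD ""), PySem.List.slice lines (some se.1) (some se.2)))

def parse_m3u_blocks_alt (lines : List String) : List String × (List (String × List String)) :=
  match pvIdxs lines with
  | [] => (lines, [])
  | i0 :: rest => (PySem.List.slice lines none (some i0), pvBlocksB lines (i0 :: rest))

-- ===== PRECONDITION & SPEC =====
def Spec_parse_m3u_blocks (lines : List String) (out : List String × (List (String × List String))) : Prop := out = parse_m3u_blocks_alt lines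
instance (lines : List String) (out : List String × (List (String × List String))) : Decidable (Spec_parse_m3u_blocks lines out) := by unfold Spec_parse_m3u_blocks; infer_instance

-- ===== CLAIM (what is proved, stated in full; the proofs are below) =====
def Claim_equal_parse_m3u_blocks : Prop := ∀ (lines : List String), Dom_parse_m3u_blocks lines → Spec_parse_m3u_blocks lines (parse_m3u_blocks lines)

-- ===== LEMMAS AND PROOFS =====

-- proof-side wrapper so that simp does not normalize the boundary test away
def pvStarts (l : String) : Bool := PySem.Str.startswith l "#EXTINF"

theorem pvStarts_eq (l : String) : PySem.Str.startswith l "#EXTINF" = pvStarts l := rfl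

theorem pvStarts_chars (l : String) :
    PySem.Chars.startswith l.toList ['#', 'E', 'X', 'T', 'I', 'N', 'F'] = pvStarts l := by
  rw [← pvStarts_eq]
  simp

-- common recursive specification both ports are proved equal to
def pvGo (n : String) (blk : List String) : List String → List (String × List String)
  | [] => [(n, blk)]
  | l :: ls => if pvStarts l then (n, blk) :: pvGo (pvName l) [l] ls
               else pvGo n (blk ++ [l]) ls

def pvTop : List String → List String × List (String × List String)
  | [] => ([], [])
  | l :: ls => if pvStarts l then ([], pvGo (pvName l) [l] ls)
               else (l :: (pvTop ls).1, (pvTop ls).2)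

-- Nat-valued boundary indices (proof-side mirror of pvIdxs)
def natIdxs : List String → List Nat
  | [] => []
  | l :: ls => if pvStarts l then 0 :: (natIdxs ls).map (· + 1)
               else (natIdxs ls).map (· + 1)

-- proof-side mirror of pvBlocksB on Nat bounds
def pairsN (lines : List String) (js : List Nat) : List (String × List String) :=
  (js.zip js.tail).map (fun se =>
    (pvName ((lines[se.1]?).getD ""), (lines.drop se.1).take (se.2 - se.1)))

theorem pvTop_noBoundary (ls : List String)
    (h : ∀ l ∈ ls, pvStarts l = false) :
    pvTop ls = (ls, []) := by
  induction ls with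
  | nil => rfl
  | cons l ls ih =>
    simp only [pvTop, h l (by simp)]
    rw [ih (fun x hx => h x (by simp [hx]))]
    simp

theorem enumerate_shift {α : Type} (xs : List α) (s : Int) :
    PySem.List.enumerate xs (s + 1) = (PySem.List.enumerate xs s).map (fun p => (p.1 + 1, p.2)) := by
  induction xs generalizing s with
  | nil => simp [PySem.List.enumerate_nil]
  | cons x xs ih => simp [PySem.List.enumerate_cons, ih (s + 1)]

theorem pvIdxs_cons (l : String) (ls : List String) :
    pvIdxs (l :: ls) =
      (if pvStarts l then [(0 : Int)] else []) ++ (pvIdxs ls).map (· + 1) := by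
  unfold pvIdxs
  simp only [pvStarts_eq]
  rw [PySem.List.enumerate_cons, show (0 : Int) + 1 = 0 + 1 by ring, enumerate_shift]
  by_cases h : pvStarts l <;>
    simp [h, List.filter_map, List.map_map, Function.comp_def]

theorem pvIdxs_eq_natIdxs (ls : List String) :
    pvIdxs ls = (natIdxs ls).map (fun k : Nat => (k : Int)) := by
  induction ls with
  | nil => rfl
  | cons l ls ih =>
    rw [pvIdxs_cons, ih]
    by_cases h : pvStarts l <;>
      simp [natIdxs, h, List.map_map, Function.comp_def]

theorem natIdxs_append (xs ys : List String) :
    natIdxs (xs ++ ys) = natIdxs xs ++ (natIdxs ys).map (· + xs.length) := by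
  induction xs with
  | nil => simp [natIdxs]
  | cons x xs ih =>
    by_cases h : pvStarts x <;>
      simp [natIdxs, h, ih, List.map_map, Function.comp_def, Nat.add_assoc]

theorem natIdxs_noBoundary (ls : List String)
    (h : ∀ l ∈ ls, pvStarts l = false) : natIdxs ls = [] := by
  induction ls with
  | nil => rfl
  | cons l ls ih =>
    simp [natIdxs, h l (by simp), ih (fun x hx => h x (by simp [hx]))]

theorem natIdxs_nil_iff (ls : List String) :
    natIdxs ls = [] ↔ ∀ l ∈ ls, pvStarts l = false := by
  induction ls with
  | nil => simp [natIdxs]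
  | cons l ls ih =>
    by_cases h : pvStarts l = true
    · simp [natIdxs, h]
    · simp [natIdxs, h, ih]

-- pvBlocksB on casted Nat bounds IS pairsN
theorem pvBlocksB_eq_pairsN (lines : List String) (js : List Nat) :
    pvBlocksB lines (js.map (fun k : Nat => (k : Int))) = pairsN lines (js ++ [lines.length]) := by
  unfold pvBlocksB pairsN
  have hb : (js.map (fun k : Nat => (k : Int))) ++ [(lines.length : Int)]
      = (js ++ [lines.length]).map (fun k : Nat => (k : Int)) := by simp
  rw [hb, ← List.map_tail, List.zip_map, List.map_map]
  apply List.map_congr_left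
  intro ⟨s, e⟩ _
  simp [PySem.List.pyGet?_natCast, PySem.List.slice_natCast]

-- shifting all bounds by |xs| on xs ++ ys is the same as the original bounds on ys
theorem pairsN_shift (xs ys : List String) (js : List Nat) :
    pairsN (xs ++ ys) (js.map (· + xs.length)) = pairsN ys js := by
  unfold pairsN
  rw [← List.map_tail, List.zip_map, List.map_map]
  apply List.map_congr_left
  intro ⟨s, e⟩ _
  have h1 : (xs ++ ys)[s + xs.length]? = ys[s]? := by
    rw [List.getElem?_append_right (by omega)]; congr 1; omega
  have h2 : (xs ++ ys).drop (s + xs.length) = ys.drop s := by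
    rw [Nat.add_comm, ← List.drop_drop, List.drop_left]
  simp [h1, h2, Nat.add_sub_add_right]

theorem pairsN_cons_cons (lines : List String) (a b : Nat) (rest : List Nat) :
    pairsN lines (a :: b :: rest) =
      (pvName ((lines[a]?).getD ""), (lines.drop a).take (b - a)) :: pairsN lines (b :: rest) := by
  simp [pairsN]

-- central lemma: the slice-based blocks of (b :: pre ++ ls), pre boundary-free, b a boundary
theorem pairsN_eq_pvGo (ls : List String) : ∀ (pre : List String) (b : String),
    pvStarts b = true → (∀ x ∈ pre, pvStarts x = false) →
    pairsN (b :: pre ++ ls) (natIdxs (b :: pre ++ ls) ++ [(b :: pre ++ ls).length]) =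
      pvGo (pvName b) (b :: pre) ls := by
  induction ls with
  | nil =>
    intro pre b hb hpre
    rw [List.append_nil]
    have hids : natIdxs (b :: pre) = [0] := by
      simp [natIdxs, hb, natIdxs_noBoundary pre hpre]
    rw [hids]
    simp [pairsN, pvGo]
  | cons l ls ih =>
    intro pre b hb hpre
    by_cases hl : pvStarts l = true
    · -- first block is b :: pre; the remaining bounds shift onto (l :: ls)
      have hhead : natIdxs (l :: ls) = 0 :: (natIdxs ls).map (· + 1) := by
        simp [natIdxs, hl]
      have hlist : natIdxs (b :: pre ++ l :: ls) ++ [(b :: pre ++ l :: ls).length]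
          = 0 :: ((natIdxs (l :: ls) ++ [(l :: ls).length]).map (· + (b :: pre).length)) := by
        have hids : natIdxs (b :: pre) = [0] := by
          simp [natIdxs, hb, natIdxs_noBoundary pre hpre]
        rw [show b :: pre ++ l :: ls = (b :: pre) ++ (l :: ls) from rfl, natIdxs_append, hids]
        simp
        omega
      have hfst : (natIdxs (l :: ls) ++ [(l :: ls).length]).map (· + (b :: pre).length)
          = (b :: pre).length :: (((natIdxs ls).map (· + 1) ++ [(l :: ls).length]).map (· + (b :: pre).length)) := by
        rw [hhead]; simp
      rw [hlist, hfst, pairsN_cons_cons]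
      have hfirst : ((b :: pre ++ l :: ls)[(0 : Nat)]?).getD "" = b := by simp
      have htake : ((b :: pre ++ l :: ls).drop 0).take ((b :: pre).length - 0) = b :: pre := by
        simp [List.take_left' (l₁ := b :: pre) (l₂ := l :: ls) rfl]
      rw [hfirst, htake]
      have hshift : pairsN (b :: pre ++ l :: ls)
          ((b :: pre).length :: (((natIdxs ls).map (· + 1) ++ [(l :: ls).length]).map (· + (b :: pre).length)))
          = pairsN (l :: ls) (natIdxs (l :: ls) ++ [(l :: ls).length]) := by
        rw [← hfst, show b :: pre ++ l :: ls = (b :: pre) ++ (l :: ls) from rfl, pairsN_shift]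
      have hih := ih [] l hl (by simp)
      simp only [List.singleton_append] at hih
      rw [hshift, hih]
      simp [pvGo, hl]
    · -- l joins b's block: reassociate and use the IH with pre ++ [l]
      have hre : b :: pre ++ l :: ls = b :: (pre ++ [l]) ++ ls := by simp
      rw [hre, ih (pre ++ [l]) b hb (by
        intro x hx
        rcases List.mem_append.1 hx with h | h
        · exact hpre x h
        · simp at h; subst h; simpa using hl)]
      simp [pvGo, hl]

-- reduction equations for the B port
theorem alt_of_idxs_nil (ls : List String) (h : pvIdxs ls = []) :
    parse_m3u_blocks_alt ls = (ls, []) := by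
  unfold parse_m3u_blocks_alt
  rw [h]

theorem alt_of_idxs_cons (ls : List String) (i : Int) (r : List Int) (h : pvIdxs ls = i :: r) :
    parse_m3u_blocks_alt ls = (PySem.List.slice ls none (some i), pvBlocksB ls (i :: r)) := by
  unfold parse_m3u_blocks_alt
  rw [h]

-- B equals the recursive specification
theorem alt_eq_pvTop (ls : List String) : parse_m3u_blocks_alt ls = pvTop ls := by
  induction ls with
  | nil => rfl
  | cons l ls ih =>
    by_cases hl : pvStarts l = true
    · -- header is empty; blocks come from pairsN_eq_pvGo with pre = []
      have hn : natIdxs (l :: ls) = 0 :: (natIdxs ls).map (· + 1) := by simp [natIdxs, hl]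
      have hidx : pvIdxs (l :: ls)
          = (0 : Int) :: ((natIdxs ls).map (· + 1)).map (fun k : Nat => (k : Int)) := by
        rw [pvIdxs_eq_natIdxs, hn]; simp
      rw [alt_of_idxs_cons _ _ _ hidx]
      have hcast : (0 : Int) :: ((natIdxs ls).map (· + 1)).map (fun k : Nat => (k : Int))
          = (natIdxs (l :: ls)).map (fun k : Nat => (k : Int)) := by rw [hn]; simp
      rw [hcast, pvBlocksB_eq_pairsN]
      have hih := pairsN_eq_pvGo ls [] l hl (by simp)
      simp only [List.singleton_append] at hih
      rw [hih]
      simp [pvTop, hl, PySem.List.slice_to]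
    · -- l goes to the header (or the whole list if no boundary at all)
      rcases hni : natIdxs ls with _ | ⟨i, r⟩
      · -- no boundary anywhere
        have hfree : ∀ x ∈ ls, pvStarts x = false := (natIdxs_nil_iff ls).1 hni
        have hnil : pvIdxs (l :: ls) = [] := by
          rw [pvIdxs_eq_natIdxs]
          simp [natIdxs, hl, hni]
        rw [alt_of_idxs_nil _ hnil]
        rw [pvTop_noBoundary (l :: ls) (by
          intro x hx
          rcases List.mem_cons.1 hx with h | h
          · subst h; simpa using hl
          · exact hfree x h)]
      · -- the first boundary of l :: ls sits one position later than that of ls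
        have hidx' : pvIdxs (l :: ls)
            = ((i + 1 : Nat) : Int) :: ((r.map (· + 1)).map (fun k : Nat => (k : Int))) := by
          rw [pvIdxs_eq_natIdxs]
          simp [natIdxs, hl, hni]
        have hidxls : pvIdxs ls = ((i : Nat) : Int) :: (r.map (fun k : Nat => (k : Int))) := by
          rw [pvIdxs_eq_natIdxs, hni]; simp
        rw [alt_of_idxs_cons _ _ _ hidx']
        rw [alt_of_idxs_cons _ _ _ hidxls] at ih
        have hhd : PySem.List.slice (l :: ls) none (some ((i + 1 : Nat) : Int))
            = l :: PySem.List.slice ls none (some ((i : Nat) : Int)) := by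
          rw [PySem.List.slice_to_natCast, PySem.List.slice_to_natCast]
          simp
        have hbl : pvBlocksB (l :: ls) (((i + 1 : Nat) : Int) :: ((r.map (· + 1)).map (fun k : Nat => (k : Int))))
            = pvBlocksB ls (((i : Nat) : Int) :: (r.map (fun k : Nat => (k : Int)))) := by
          rw [show ((i + 1 : Nat) : Int) :: ((r.map (· + 1)).map (fun k : Nat => (k : Int)))
              = (((i :: r).map (· + 1)).map (fun k : Nat => (k : Int))) by simp,
            show ((i : Nat) : Int) :: (r.map (fun k : Nat => (k : Int)))
              = ((i :: r).map (fun k : Nat => (k : Int))) by simp,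
            pvBlocksB_eq_pairsN, pvBlocksB_eq_pairsN]
          rw [show ((i :: r).map (· + 1)) ++ [(l :: ls).length] = ((i :: r) ++ [ls.length]).map (· + [l].length) by simp,
            show l :: ls = [l] ++ ls from rfl, pairsN_shift]
        rw [hbl, hhd]
        have hTop : pvTop (l :: ls) = (l :: (pvTop ls).1, (pvTop ls).2) := by
          simp [pvTop, hl]
        rw [hTop, ← ih]

-- A-side: running the fold from an in-block state, then flushing
theorem foldA_inBlock (ls : List String) : ∀ (h : List String) (bs : List (String × List String))
    (cur : List String) (n : String), cur ≠ [] →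
    pvFinishA (ls.foldl pvStepA (h, bs, cur, some n, true)) = (h, bs ++ pvGo n cur ls) := by
  induction ls with
  | nil =>
    intro h bs cur n hcur
    simp [pvFinishA, pvGo, hcur]
  | cons l ls ih =>
    intro h bs cur n hcur
    rw [List.foldl_cons]
    by_cases hl : pvStarts l = true
    · rw [show pvStepA (h, bs, cur, some n, true) l = (h, bs ++ [(n, cur)], [l], some (pvName l), true) by
        simp [pvStepA, pvStarts_chars, hl, hcur]]
      rw [ih h (bs ++ [(n, cur)]) [l] (pvName l) (by simp)]
      simp [pvGo, hl]
    · rw [show pvStepA (h, bs, cur, some n, true) l = (h, bs, cur ++ [l], some n, true) by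
        simp [pvStepA, pvStarts_chars, hl]]
      rw [ih h bs (cur ++ [l]) n (by simp)]
      simp [pvGo, hl]

-- A-side: the header phase
theorem foldA_header (ls : List String) : ∀ (h : List String),
    pvFinishA (ls.foldl pvStepA (h, [], [], none, false)) = (h ++ (pvTop ls).1, (pvTop ls).2) := by
  induction ls with
  | nil => intro h; simp [pvFinishA, pvTop]
  | cons l ls ih =>
    intro h
    rw [List.foldl_cons]
    by_cases hl : pvStarts l = true
    · rw [show pvStepA (h, [], [], none, false) l = (h, [], [l], some (pvName l), true) by
        simp [pvStepA, pvStarts_chars, hl]]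
      rw [foldA_inBlock ls h [] [l] (pvName l) (by simp)]
      simp [pvTop, hl]
    · rw [show pvStepA (h, [], [], none, false) l = (h ++ [l], [], [], none, false) by
        simp [pvStepA, pvStarts_chars, hl]]
      rw [ih (h ++ [l])]
      simp [pvTop, hl]

theorem A_eq_pvTop (ls : List String) : parse_m3u_blocks ls = pvTop ls := by
  unfold parse_m3u_blocks
  rw [foldA_header ls []]
  simp

-- ===== VERDICT (by name: the statement is the Claim_ definition above) =====
theorem parse_m3u_blocks_spec : Claim_equal_parse_m3u_blocks := by
  intro lines _
  unfold Spec_parse_m3u_blocks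
  rw [A_eq_pvTop, alt_eq_pvTop]
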